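-- pv_equiv track=rewrite | github.com/kahandboo/baekjoon | 백준/Gold/1208. 부분수열의 합 2/부분수열의 합 2.py | com
-- ===== SOURCE A (Python) =====
-- from itertools import combinations
--
-- def com(arr):
--     n = len(arr)
--     result = []
--
--     for i in range(n+1):
--         for comb in combinations(arr, i):
--             if len(comb) == 0:
--                 continue
--             result.append(sum(comb))
--
--     return result
-- ===== SOURCE B (Python) =====
-- def com(arr):
--     result = []
--
--     def go(xs, k, acc):
--         # include/exclude recursion with running partial sum;
--         # including the head first yields combinations' lexicographic order
--         if k == 0:
--             result.append(acc)
--             return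
--         if len(xs) < k:
--             return
--         go(xs[1:], k - 1, acc + xs[0])
--         go(xs[1:], k, acc)
--
--     for k in range(1, len(arr) + 1):
--         go(arr, k, 0)
--     return result
-- ===== Notes on version B (the rewrite author's own statement) =====
-- stated objective: alternative
-- what changed: Replaces the itertools.combinations materialisation plus sum() over each tuple by a single include/exclude recursion that carries a running partial sum and prunes branches with too few elements left, appending each completed sum directly.
import Mathlib
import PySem

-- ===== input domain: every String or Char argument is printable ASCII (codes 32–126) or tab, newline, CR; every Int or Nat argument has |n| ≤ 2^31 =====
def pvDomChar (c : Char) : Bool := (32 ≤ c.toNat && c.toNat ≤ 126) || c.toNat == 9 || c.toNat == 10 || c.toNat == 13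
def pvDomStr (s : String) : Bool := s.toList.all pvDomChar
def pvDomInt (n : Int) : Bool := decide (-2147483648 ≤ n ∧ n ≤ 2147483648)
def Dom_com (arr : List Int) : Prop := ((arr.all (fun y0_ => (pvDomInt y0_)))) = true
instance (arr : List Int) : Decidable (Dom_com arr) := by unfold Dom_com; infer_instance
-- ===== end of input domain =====

-- B replaces combinations+sum by an include/exclude recursion carrying a running partial sum (alternative decomposition; not measured faster).

-- ===== PORT A =====
-- itertools.combinations(arr, k) ported by hand: exact lexicographic order (tuples as lists)
def pyCombinations : Nat → List Int → List (List Int)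
  | 0, _ => [[]]
  | _ + 1, [] => []
  | k + 1, x :: xs => (pyCombinations k xs).map (fun c => x :: c) ++ pyCombinations (k + 1) xs

def com (arr : List Int) : List Int :=
  -- n = len(arr) inlined
  (List.range (arr.length + 1)).foldl
    (fun result i =>
      (pyCombinations i arr).foldl
        (fun result comb => if comb.length = 0 then result else result ++ [comb.sum])
        result)
    []

-- ===== PORT B =====
def comGo : List Int → Nat → Int → List Int
  | _, 0, acc => [acc]
  | [], _ + 1, _ => []
  | x :: xs, k + 1, acc =>
    if (x :: xs).length < k + 1 then []
    else comGo xs k (acc + x) ++ comGo xs (k + 1) acc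

def com_alt (arr : List Int) : List Int :=
  (List.range arr.length).foldl (fun result k => result ++ comGo arr (k + 1) 0) []

-- ===== PRECONDITION & SPEC =====
def Spec_com (arr : List Int) (out : List Int) : Prop := out = com_alt arr
instance (arr : List Int) (out : List Int) : Decidable (Spec_com arr out) := by unfold Spec_com; infer_instance

-- ===== CLAIM (what is proved, stated in full; the proofs are below) =====
def Claim_equal_com : Prop := ∀ (arr : List Int), Dom_com arr → Spec_com arr (com arr)

-- ===== LEMMAS AND PROOFS =====

theorem pyCombinations_nil_of_short (k : Nat) (xs : List Int) (h : xs.length < k) :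
    pyCombinations k xs = [] := by
  induction xs generalizing k with
  | nil =>
    cases k with
    | zero => omega
    | succ k => rfl
  | cons x xs ih =>
    cases k with
    | zero => omega
    | succ k =>
      simp only [List.length_cons] at h
      simp only [pyCombinations]
      rw [ih k (by omega), ih (k + 1) (by omega)]
      simp

theorem comGo_eq_map (xs : List Int) (k : Nat) (acc : Int) :
    comGo xs k acc = (pyCombinations k xs).map (fun c => acc + c.sum) := by
  induction xs generalizing k acc with
  | nil =>
    cases k with
    | zero => simp [comGo, pyCombinations]
    | succ k => simp [comGo, pyCombinations]
  | cons x xs ih =>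
    cases k with
    | zero => simp [comGo, pyCombinations]
    | succ k =>
      simp only [comGo]
      split
      · next h =>
        rw [pyCombinations_nil_of_short (k + 1) (x :: xs) h]
        simp
      · simp only [pyCombinations]
        rw [ih, ih]
        simp only [List.map_append, List.map_map]
        congr 1
        apply List.map_congr_left
        intro c _
        simp [Function.comp]
        ring

theorem length_mem_pyCombinations (k : Nat) (xs : List Int) (c : List Int)
    (hc : c ∈ pyCombinations k xs) : c.length = k := by
  induction xs generalizing k c with
  | nil =>
    cases k with
    | zero => simp [pyCombinations] at hc; simp [hc]
    | succ k => simp [pyCombinations] at hc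
  | cons x xs ih =>
    cases k with
    | zero => simp [pyCombinations] at hc; simp [hc]
    | succ k =>
      simp only [pyCombinations, List.mem_append, List.mem_map] at hc
      rcases hc with ⟨d, hd, rfl⟩ | h
      · simpa using ih k d hd
      · exact ih (k + 1) c h

theorem foldl_if_all_nonempty (l : List (List Int)) (res : List Int)
    (h : ∀ c ∈ l, c.length ≠ 0) :
    l.foldl (fun r c => if c.length = 0 then r else r ++ [c.sum]) res
      = res ++ l.map List.sum := by
  induction l generalizing res with
  | nil => simp
  | cons c l ih =>
    simp only [List.foldl_cons, List.map_cons]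
    rw [if_neg (h c (by simp)), ih _ (fun d hd => h d (by simp [hd]))]
    simp

-- ===== VERDICT (by name: the statement is the Claim_ definition above) =====
theorem com_spec : Claim_equal_com := by
  intro arr _
  unfold Spec_com com com_alt
  rw [List.range_succ_eq_map]
  simp only [List.foldl_cons, List.foldl_map]
  have h0 : (pyCombinations 0 arr).foldl
      (fun result comb => if comb.length = 0 then result else result ++ [comb.sum]) [] = ([] : List Int) := by
    simp [pyCombinations]
  rw [h0]
  have hfun :
      (fun (r : List Int) (k : Nat) =>
        (pyCombinations (k + 1) arr).foldl
          (fun result comb => if comb.length = 0 then result else result ++ [comb.sum]) r)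
      = fun (r : List Int) (k : Nat) => r ++ comGo arr (k + 1) 0 := by
    funext r k
    rw [foldl_if_all_nonempty _ r (fun c hc => by
        have := length_mem_pyCombinations (k + 1) arr c hc; omega),
      comGo_eq_map]
    congr 1
    apply List.map_congr_left
    intro c _
    simp
  rw [hfun]
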